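-- pv_equiv track=rewrite | github.com/SanyogitaPiya/LLM4TDD-Manual-Vs-Automated | ManualTDD/BVA tests/Exact Match Implementation.py | find_almost_equal_substring
-- ===== SOURCE A (Python) =====
-- def find_almost_equal_substring(s: str, pattern: str) -> int:
--     pattern_length = len(pattern)
--
--     # Iterate through all substrings of s with the length of pattern
--     for i in range(len(s) - pattern_length + 1):
--         # Extract the substring of s that matches the length of pattern
--         substring = s[i:i + pattern_length]
--
--         # If the substring matches exactly, return the current index
--         if substring == pattern:
--             return i
--
--         # Count the number of differing characters
--         differences = sum(1 for x, y in zip(substring, pattern) if x != y)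
--
--         # Check if exactly one character needs to change to match the pattern
--         if differences == 1:
--             return i
--
--     # If no almost-equal substring is found, return -1
--     return -1
-- ===== SOURCE B (Python) =====
-- def find_almost_equal_substring(s: str, pattern: str) -> int:
--     n, m = len(s), len(pattern)
--     if m > n:
--         return -1
--     # Mismatch-count table built column by column: after the loop, counts[i]
--     # is the number of positions where s[i:i+m] differs from pattern.
--     counts = [0] * (n - m + 1)
--     for j, pc in enumerate(pattern):
--         counts = [c + (1 if s[i + j] != pc else 0) for i, c in enumerate(counts)]
--     for i, c in enumerate(counts):
--         if c <= 1:
--             return i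
--     return -1
-- ===== Notes on version B (the rewrite author's own statement) =====
-- stated objective: alternative
-- what changed: Replaces the window-by-window scan (slice each window, equality test, then count its mismatches, returning early) by a transposed two-stage computation: a column-major pass over the pattern positions accumulates a table of per-start mismatch counts, then a separate scan returns the first index whose count is at most 1.
import Mathlib
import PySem

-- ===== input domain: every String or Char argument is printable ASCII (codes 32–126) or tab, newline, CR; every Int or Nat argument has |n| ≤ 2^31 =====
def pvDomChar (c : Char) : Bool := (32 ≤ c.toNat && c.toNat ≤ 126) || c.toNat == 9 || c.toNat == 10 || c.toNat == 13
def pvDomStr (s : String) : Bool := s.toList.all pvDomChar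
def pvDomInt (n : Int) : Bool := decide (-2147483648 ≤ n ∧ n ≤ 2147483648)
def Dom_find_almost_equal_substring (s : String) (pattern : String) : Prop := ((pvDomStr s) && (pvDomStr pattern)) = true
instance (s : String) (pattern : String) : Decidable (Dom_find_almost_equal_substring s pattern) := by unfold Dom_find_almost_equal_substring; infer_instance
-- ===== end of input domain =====

-- B replaces A's window-by-window scan (slice, equality test, mismatch count, early return)
-- by a transposed two-stage computation: a column-major pass over the pattern positions
-- accumulates a table of per-start mismatch counts, then a separate scan returns the first
-- index whose count is ≤ 1; same return value everywhere (objective: alternative).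

-- ===== PORT A =====
-- the loop 'for i in range(len(s) - m + 1): …' with early returns
def pvALoop (sl p : List Char) (m : Int) : List Int → Int
  | [] => -1
  | i :: rest =>
      let sub := PySem.List.slice sl (some i) (some (i + m))
      if sub = p then i
      else if ((sub.zip p).countP (fun xy => xy.1 ≠ xy.2) : Int) = 1 then i
      else pvALoop sl p m rest

def find_almost_equal_substring (s : String) (pattern : String) : Int :=
  pvALoop s.toList pattern.toList (pattern.toList.length : Int)
    (PySem.List.pyRange 0 ((s.toList.length : Int) - (pattern.toList.length : Int) + 1) 1)

-- ===== PORT B =====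
-- one column pass: 'counts = [c + (1 if s[i + j] != pc else 0) for i, c in enumerate(counts)]';
-- i + j is always in range here (i ≤ n - m, j < m), so pyGet? is some and '.getD pc' is exact
def pvColStep (sl : List Char) (j : Int) (pc : Char) (counts : List Int) : List Int :=
  (PySem.List.enumerate counts 0).map (fun ic =>
    ic.2 + (if (PySem.List.pyGet? sl (ic.1 + j)).getD pc ≠ pc then 1 else 0))

-- the final 'for i, c in enumerate(counts): if c <= 1: return i' scan
def pvScan : List Int → Int → Int
  | [], _ => -1
  | c :: cs, i => if c ≤ 1 then i else pvScan cs (i + 1)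

def find_almost_equal_substring_alt (s : String) (pattern : String) : Int :=
  let sl := s.toList
  let p := pattern.toList
  if (p.length : Int) > (sl.length : Int) then -1
  else
    -- '[0] * (n - m + 1)': under the guard m ≤ n, so Nat subtraction agrees with Python's
    let counts := (PySem.List.enumerate p 0).foldl
      (fun cs jp => pvColStep sl jp.1 jp.2 cs)
      (List.replicate (sl.length - p.length + 1) (0 : Int))
    pvScan counts 0

-- ===== PRECONDITION & SPEC =====
def Spec_find_almost_equal_substring (s : String) (pattern : String) (out : Int) : Prop := out = find_almost_equal_substring_alt s pattern
instance (s : String) (pattern : String) (out : Int) : Decidable (Spec_find_almost_equal_substring s pattern out) := by unfold Spec_find_almost_equal_substring; infer_instance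

-- ===== CLAIM =====
def Claim_equal_find_almost_equal_substring : Prop := ∀ (s : String) (pattern : String), Dom_find_almost_equal_substring s pattern → Spec_find_almost_equal_substring s pattern (find_almost_equal_substring s pattern)

-- ===== LEMMAS AND PROOFS =====

-- the contribution of column j (char pc) to row i
def pvInd (sl : List Char) (i j : Int) (pc : Char) : Int :=
  if (PySem.List.pyGet? sl (i + j)).getD pc ≠ pc then 1 else 0

-- row value of the column-wise accumulation: sum of pvInd over the remaining columns
def pvColSum (sl : List Char) (i : Int) : Int → List Char → Int
  | _, [] => 0
  | j, pc :: ps => pvInd sl i j pc + pvColSum sl i (j + 1) ps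

theorem enum_map {α β : Type} (f : α → β) (l : List α) (st : Int) :
    PySem.List.enumerate (l.map f) st = (PySem.List.enumerate l st).map (fun p => (p.1, f p.2)) := by
  induction l generalizing st with
  | nil => simp [PySem.List.enumerate_nil]
  | cons x xs ih => simp [PySem.List.enumerate_cons, ih]

theorem enum_range (N : ℕ) :
    PySem.List.enumerate (List.range N) 0 = (List.range N).map (fun (i : ℕ) => ((i : Int), i)) := by
  induction N with
  | zero => simp [PySem.List.enumerate_nil]
  | succ n ih =>
    rw [List.range_succ, PySem.List.enumerate_append, ih]
    simp [PySem.List.enumerate_cons, PySem.List.enumerate_nil]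

-- one column pass on a table indexed by range N
theorem colStep_map (sl : List Char) (j : Int) (pc : Char) (N : ℕ) (g : ℕ → Int) :
    pvColStep sl j pc ((List.range N).map g)
      = (List.range N).map (fun (i : ℕ) => g i + pvInd sl (i : Int) j pc) := by
  unfold pvColStep
  rw [enum_map, enum_range, List.map_map, List.map_map]
  rfl

-- fold invariant: column-major accumulation computes the per-row sums
theorem fold_cols (sl : List Char) (N : ℕ) :
    ∀ (q : List Char) (j : Int) (g : ℕ → Int),
    (PySem.List.enumerate q j).foldl (fun cs jp => pvColStep sl jp.1 jp.2 cs) ((List.range N).map g)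
      = (List.range N).map (fun (i : ℕ) => g i + pvColSum sl (i : Int) j q) := by
  intro q
  induction q with
  | nil => intro j g; simp [PySem.List.enumerate_nil, pvColSum]
  | cons pc ps ih =>
    intro j g
    rw [PySem.List.enumerate_cons]
    simp only [List.foldl_cons]
    rw [colStep_map, ih (j + 1) (fun i => g i + pvInd sl (i : Int) j pc)]
    apply List.map_congr_left
    intro i _
    simp [pvColSum]
    ring

-- row value = mismatch count of the window, whenever the window fits
theorem colSum_eq_count (sl : List Char) (p : List Char) :
    ∀ (i k : ℕ), i + k + p.length ≤ sl.length →
    pvColSum sl (i : Int) (k : Int) p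
      = ((((sl.drop (i + k)).take p.length).zip p).countP (fun xy => xy.1 ≠ xy.2) : Int) := by
  induction p with
  | nil => intro i k _; simp [pvColSum]
  | cons pc ps ih =>
    intro i k h
    have hik : i + k < sl.length := by simp at h; omega
    have hdrop : sl.drop (i + k) = sl[i + k] :: sl.drop (i + k + 1) :=
      List.drop_eq_getElem_cons hik
    have hget : PySem.List.pyGet? sl ((i : Int) + (k : Int)) = some sl[i + k] := by
      have : ((i : Int) + (k : Int)) = ((i + k : ℕ) : Int) := by push_cast; ring
      rw [this, PySem.List.pyGet?_natCast]
      exact List.getElem?_eq_getElem hik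
    have ihk := ih i (k + 1) (by simp at h ⊢; omega)
    rw [show i + (k + 1) = i + k + 1 from by ring] at ihk
    have ihk' : pvColSum sl (i : Int) ((k : Int) + 1) ps
        = ((((sl.drop (i + k + 1)).take ps.length).zip ps).countP (fun xy => xy.1 ≠ xy.2) : Int) := by
      rw [show ((k : Int) + 1) = (((k + 1 : ℕ)) : Int) from by push_cast; ring]
      exact ihk
    simp only [pvColSum, pvInd, hget, Option.getD_some, hdrop, List.length_cons,
      List.take_succ_cons, List.zip_cons_cons, List.countP_cons, ihk']
    by_cases hc : sl[i + k] = pc <;> simp [hc] <;> push_cast <;> ring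

-- equal-length lists are equal iff no zipped pair mismatches
theorem eq_iff_count_zero (w p : List Char) (h : w.length = p.length) :
    w = p ↔ (w.zip p).countP (fun xy => xy.1 ≠ xy.2) = 0 := by
  induction w generalizing p with
  | nil => cases p <;> simp_all
  | cons x xs ih =>
    cases p with
    | nil => simp_all
    | cons y ys =>
      by_cases hxy : x = y
      · simp [hxy, ih ys (by simpa using h)]
      · simp [hxy]

-- A's early-return scan over indices equals B's scan of the count table
theorem scan_eq (sl p : List Char) (hmn : p.length ≤ sl.length) :
    ∀ (d j : ℕ), j + d = sl.length - p.length + 1 →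
    pvALoop sl p (p.length : Int)
        (PySem.List.pyRange (j : Int) ((sl.length : Int) - (p.length : Int) + 1) 1)
      = pvScan ((List.range' j d).map
          (fun (i : ℕ) => pvColSum sl (i : Int) 0 p)) (j : Int) := by
  intro d
  induction d with
  | zero =>
    intro j hj
    have : PySem.List.pyRange (j : Int) ((sl.length : Int) - (p.length : Int) + 1) 1 = [] := by
      apply PySem.List.pyRange_one_eq_nil; omega
    simp [this, pvALoop, pvScan]
  | succ d ih =>
    intro j hj
    have hjlt : (j : Int) < (sl.length : Int) - (p.length : Int) + 1 := by omega
    have hwin : j + p.length ≤ sl.length := by omega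
    rw [PySem.List.pyRange_one_cons hjlt, List.range'_succ, List.map_cons]
    have hsub : PySem.List.slice sl (some (j : Int)) (some ((j : Int) + (p.length : Int)))
        = (sl.drop j).take p.length := PySem.List.slice_natCast_add sl j p.length
    have hlen : ((sl.drop j).take p.length).length = p.length := by
      simp; omega
    have hcnt := colSum_eq_count sl p j 0 (by omega)
    rw [Nat.add_zero] at hcnt
    simp only [Nat.cast_zero] at hcnt
    set c : ℕ := (((sl.drop j).take p.length).zip p).countP (fun xy => xy.1 ≠ xy.2) with hc
    have heq := eq_iff_count_zero _ p hlen
    simp only [pvALoop, pvScan, hsub]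
    by_cases h0 : (sl.drop j).take p.length = p
    · have : c = 0 := heq.mp h0
      rw [if_pos h0, if_pos (by rw [hcnt, this]; norm_num)]
    · have hc0 : c ≠ 0 := fun h => h0 (heq.mpr h)
      rw [if_neg h0]
      by_cases h1 : c = 1
      · rw [if_pos (by rw [← hc]; exact_mod_cast h1), if_pos (by rw [hcnt, h1]; norm_num)]
      · have hge : 2 ≤ c := by omega
        rw [if_neg (by rw [← hc]; exact_mod_cast h1),
            if_neg (by rw [hcnt]; exact_mod_cast by omega)]
        have := ih (j + 1) (by omega)
        push_cast at this ⊢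
        rw [this]

-- ===== VERDICT =====
theorem find_almost_equal_substring_spec : Claim_equal_find_almost_equal_substring := by
  intro s pattern _
  unfold Spec_find_almost_equal_substring find_almost_equal_substring find_almost_equal_substring_alt
  set sl := s.toList with hsl
  set p := pattern.toList with hp
  by_cases hlen : (p.length : Int) > (sl.length : Int)
  · have : PySem.List.pyRange 0 ((sl.length : Int) - (p.length : Int) + 1) 1 = [] := by
      apply PySem.List.pyRange_one_eq_nil; omega
    simp [hlen, this, pvALoop]
  · have hmn : p.length ≤ sl.length := by omega
    rw [if_neg hlen]
    have hrepl : List.replicate (sl.length - p.length + 1) (0 : Int)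
        = (List.range (sl.length - p.length + 1)).map (fun _ => (0 : Int)) := by
      simp [List.map_const']
    simp only [hrepl, fold_cols sl (sl.length - p.length + 1) p 0 (fun _ => (0 : Int))]
    have hz : (List.range (sl.length - p.length + 1)).map
          (fun (i : ℕ) => (0 : Int) + pvColSum sl (i : Int) 0 p)
        = (List.range' 0 (sl.length - p.length + 1)).map (fun (i : ℕ) => pvColSum sl (i : Int) 0 p) := by
      rw [List.range_eq_range']
      exact List.map_congr_left (fun i _ => by ring)
    rw [hz]
    exact scan_eq sl p hmn (sl.length - p.length + 1) 0 (by omega)
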